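-- pv_equiv track=rewrite | github.com/hifrickenfive/StanfordAI | Homework/archive/sentences.py | mutate_sentences
-- ===== SOURCE A (Python) =====
-- import collections
--
-- def mutate_sentences(sentence:str):
--     word_list = sentence.split()
--     MAX_LENGTH = len(word_list)
--
--     word_dict = collections.defaultdict(list) # create lookup
--     for i in range(len(word_list)-1):
--         word_dict[word_list[i]].append(word_list[i+1])
--
--     def dfs(sentences:list, current_sentence:list, lookup:dict, key:str, current_length:int, MAX_LENGTH:int):
--         current_sentence.append(key)
--         current_length += 1
--
--         if len(current_sentence) == MAX_LENGTH: # Base case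
--             sentences.append(' '.join(current_sentence))
--             return
--         elif key not in lookup.keys(): # Block use of the last word of input sentence in the middle of new sentence
--             return
--         else:
--             for neighbour in lookup[key]:
--                 if len(lookup[key]) > 1: # Spawn copy of list for each branch
--                     dfs(sentences,  current_sentence.copy(), lookup, neighbour, current_length, MAX_LENGTH)
--                 else:
--                     dfs(sentences, current_sentence, lookup, neighbour, current_length, MAX_LENGTH)
--
--     all_sentences = list()
--     for key in word_dict.keys():
--         subset_of_all_sentences = list()
--         current_sentence = list()
--         dfs(subset_of_all_sentences, current_sentence, word_dict, key, 0, MAX_LENGTH)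
--         all_sentences.append(subset_of_all_sentences)
--     all_sentences = sum(all_sentences, [])  # Flatten nested list
--     return all_sentences
-- ===== SOURCE B (Python) =====
-- def mutate_sentences(sentence: str):
--     words = sentence.split()
--     n = len(words)
--     succ = {}
--     for a, b in zip(words, words[1:]):
--         succ.setdefault(a, []).append(b)
--     out = []
--     for start in succ:
--         paths = [[start]]
--         for _ in range(n - 1):
--             paths = [p + [nb] for p in paths for nb in succ.get(p[-1], [])]
--         out.extend(' '.join(p) for p in paths)
--     return out
-- ===== Notes on version B (the rewrite author's own statement) =====
-- stated objective: simpler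
-- what changed: Replaces A's accumulator-mutating recursive DFS (with its copy-vs-share branching and nested-list flattening) by an iterative level-by-level expansion of partial sentences built with list comprehensions.
import Mathlib
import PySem

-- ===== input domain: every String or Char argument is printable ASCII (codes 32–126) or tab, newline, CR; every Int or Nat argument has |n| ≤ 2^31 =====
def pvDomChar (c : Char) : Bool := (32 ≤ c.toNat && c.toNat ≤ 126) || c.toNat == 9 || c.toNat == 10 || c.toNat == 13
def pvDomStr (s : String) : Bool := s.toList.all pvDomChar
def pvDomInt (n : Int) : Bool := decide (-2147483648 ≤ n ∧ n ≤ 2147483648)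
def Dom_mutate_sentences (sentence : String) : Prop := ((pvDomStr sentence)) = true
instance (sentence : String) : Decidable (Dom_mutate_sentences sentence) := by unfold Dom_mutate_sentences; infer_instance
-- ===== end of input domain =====

-- B replaces A's recursive accumulator-mutating DFS by an iterative level-by-level
-- expansion of partial sentences (simpler decomposition; same asymptotic cost).

-- ===== PORT A =====
-- A's dfs mutates `sentences` / `current_sentence` in place; a functional port threads
-- `sentences` and passes `current_sentence` by value (the copy-vs-share branch of A is
-- value-identical, it is kept literally). `fuel` only makes the recursion total; with the
-- fuel A is called with it never runs out.
def dfsA (fuel : Nat) (sentences : List String) (current_sentence : List String)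
    (lookup : PySem.Dict String (List String)) (key : String)
    (current_length : Int) (MAX_LENGTH : Int) : List String :=
  match fuel with
  | 0 => sentences
  | fuel + 1 =>
    let current_sentence := current_sentence ++ [key]
    let current_length := current_length + 1
    if PySem.List.len current_sentence == MAX_LENGTH then
      sentences ++ [PySem.Str.join " " current_sentence]
    else if !(lookup.contains key) then
      sentences
    else
      (lookup.getD key []).foldl
        (fun sentences neighbour =>
          if PySem.List.len (lookup.getD key []) > 1 then
            dfsA fuel sentences current_sentence lookup neighbour current_length MAX_LENGTH
          else
            dfsA fuel sentences current_sentence lookup neighbour current_length MAX_LENGTH)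
        sentences

def mutate_sentences (sentence : String) : List String :=
  let word_list := PySem.Str.split₀ sentence
  let MAX_LENGTH := PySem.List.len word_list
  let word_dict : PySem.Dict String (List String) :=
    (PySem.List.pyRange 0 (PySem.List.len word_list - 1) 1).foldl
      (fun d i => d.modify (PySem.List.pyGetD word_list i "") []
        (fun v => v ++ [PySem.List.pyGetD word_list (i + 1) ""]))
      PySem.Dict.empty
  let all_sentences : List (List String) :=
    word_dict.keys.foldl
      (fun all key =>
        all ++ [dfsA (word_list.length + 1) [] [] word_dict key 0 MAX_LENGTH])
      []
  all_sentences.foldl (fun acc x => acc ++ x) []   -- sum(all_sentences, [])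

-- ===== PORT B =====
def mutate_sentences_alt (sentence : String) : List String :=
  let words := PySem.Str.split₀ sentence
  let n := words.length
  let succ : PySem.Dict String (List String) :=
    (words.zip words.tail).foldl
      (fun d p => d.modify p.1 [] (fun v => v ++ [p.2])) PySem.Dict.empty
  succ.keys.foldl
    (fun out start =>
      let paths :=
        (List.range (n - 1)).foldl
          (fun ps _ =>
            ps.flatMap (fun p =>
              (succ.getD (PySem.List.pyGetD p (-1) "") []).map (fun nb => p ++ [nb])))
          [[start]]
      out ++ paths.map (fun p => PySem.Str.join " " p))
    []

-- ===== PRECONDITION & SPEC =====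
def Spec_mutate_sentences (sentence : String) (out : List String) : Prop := out = mutate_sentences_alt sentence
instance (sentence : String) (out : List String) : Decidable (Spec_mutate_sentences sentence out) := by unfold Spec_mutate_sentences; infer_instance

-- ===== CLAIM (what is proved, stated in full; the proofs are below) =====
def Claim_equal_mutate_sentences : Prop := ∀ (sentence : String), Dom_mutate_sentences sentence → Spec_mutate_sentences sentence (mutate_sentences sentence)

-- ===== LEMMAS AND PROOFS =====

-- all continuations of length k from `key` through dict `d`
-- all continuations of length k from `key` through dict `d`
def tails (d : PySem.Dict String (List String)) : Nat → String → List (List String)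
  | 0, _ => [[]]
  | k + 1, key => (d.getD key []).flatMap (fun nb => (tails d k nb).map (nb :: ·))

theorem contains_false_getD (d : PySem.Dict String (List String)) (k : String)
    (h : d.contains k = false) : d.getD k [] = [] := by
  simp [PySem.Dict.getD, (PySem.Dict.get?_eq_none_iff_contains d k).2 (by simp [h])]

theorem dfsA_eq (d : PySem.Dict String (List String)) (maxLen : Int) :
    ∀ (r fuel : Nat) (s cur : List String) (key : String) (c : Int),
      r + 1 ≤ fuel → ((cur.length : Int) + 1 + r = maxLen) →
      dfsA fuel s cur d key c maxLen =
        s ++ (tails d r key).map (fun t => PySem.Str.join " " (cur ++ key :: t)) := by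
  intro r
  induction r with
  | zero =>
    intro fuel s cur key c hf hl
    match fuel, hf with
    | f + 1, _ =>
      simp only [dfsA, tails, List.map]
      rw [if_pos (by simp [PySem.List.len_eq]; omega)]
  | succ k ih =>
    intro fuel s cur key c hf hl
    match fuel, hf with
    | f + 1, hf =>
      simp only [dfsA]
      rw [if_neg (by simp [PySem.List.len_eq]; omega)]
      by_cases hc : d.contains key
      · rw [if_neg (by simp [hc])]
        simp only [ite_self]
        have hfun : (fun (s : List String) (nb : String) =>
            dfsA f s (cur ++ [key]) d nb (c + 1) maxLen) =
            (fun s nb => s ++ (tails d k nb).map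
              (fun t => PySem.Str.join " " (cur ++ key :: nb :: t))) := by
          funext s' nb
          rw [ih f s' (cur ++ [key]) nb (c + 1) (by omega) (by simp; omega)]
          simp
        rw [hfun, PySem.List.foldl_append_eq_flatMap]
        simp [tails, List.map_flatMap, List.map_map, Function.comp_def]
      · rw [if_pos (by simp [hc])]
        simp [tails, contains_false_getD d key (by simpa using hc)]

theorem lastD_cons_cons (a b : String) (t : List String) :
    PySem.List.pyGetD (a :: b :: t) (-1) "" = PySem.List.pyGetD (b :: t) (-1) "" := by
  rw [PySem.List.pyGetD_neg_one (a :: b :: t) "" (by simp),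
      PySem.List.pyGetD_neg_one (b :: t) "" (by simp)]
  simp

theorem tails_snoc (d : PySem.Dict String (List String)) :
    ∀ (k : Nat) (key : String),
      tails d (k + 1) key =
        (tails d k key).flatMap (fun t =>
          (d.getD (PySem.List.pyGetD (key :: t) (-1) "") []).map (fun nb => t ++ [nb])) := by
  intro k
  induction k with
  | zero =>
    intro key
    have h1 : PySem.List.pyGetD [key] (-1) "" = key := by
      simpa using PySem.List.pyGetD_neg_one_append_singleton ([] : List String) key ""
    have h2 : ∀ (l : List String), (List.map (fun nb => [[nb]]) l).flatten = List.map (fun nb => [nb]) l := by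
      intro l; induction l with
      | nil => rfl
      | cons a l ihl => simp [ihl]
    simp [tails, h1, List.flatMap, h2]
  | succ k ih =>
    intro key
    have hL : tails d (k+1+1) key
        = (d.getD key []).flatMap (fun nb => (tails d (k+1) nb).map (nb :: ·)) := rfl
    have hR : tails d (k+1) key
        = (d.getD key []).flatMap (fun nb => (tails d k nb).map (nb :: ·)) := rfl
    rw [hL, hR]
    simp only [ih, List.map_flatMap, List.flatMap_map, List.flatMap_assoc,
      List.cons_append, lastD_cons_cons]
    simp [List.map_map, Function.comp_def]

theorem iterB (d : PySem.Dict String (List String)) :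
    ∀ (k : Nat) (key : String),
      (List.range k).foldl
        (fun ps _ => ps.flatMap (fun p =>
          (d.getD (PySem.List.pyGetD p (-1) "") []).map (fun nb => p ++ [nb])))
        [[key]]
      = (tails d k key).map (key :: ·) := by
  intro k
  induction k with
  | zero => intro key; simp [tails]
  | succ k ih =>
    intro key
    rw [List.range_succ, List.foldl_append, ih, tails_snoc]
    simp [List.flatMap_map, List.map_flatMap, List.map_map, Function.comp_def]

theorem pairs_eq :
    ∀ (ws : List String),
      (List.range (ws.length - 1)).map (fun k => (ws.getD k "", ws.getD (k + 1) ""))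
        = ws.zip ws.tail := by
  intro ws
  match ws with
  | [] => simp
  | [w] => simp
  | w1 :: w2 :: rest =>
    have ih := pairs_eq (w2 :: rest)
    simp only [List.length_cons, Nat.add_sub_cancel] at ih ⊢
    rw [List.range_succ_eq_map]
    simp only [List.map_cons, List.map_map, Function.comp_def, List.getD_cons_succ,
      List.getD_cons_zero]
    simp only [List.zip_cons_cons, List.tail_cons] at ih ⊢
    exact congrArg _ ih

theorem dictA_eq (ws : List String) :
    (PySem.List.pyRange 0 (PySem.List.len ws - 1) 1).foldl
      (fun d i => d.modify (PySem.List.pyGetD ws i "") []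
        (fun v => v ++ [PySem.List.pyGetD ws (i + 1) ""])) PySem.Dict.empty
    = (ws.zip ws.tail).foldl
      (fun d p => d.modify p.1 [] (fun v => v ++ [p.2])) PySem.Dict.empty := by
  rw [PySem.List.pyRange_one]
  have hm : (PySem.List.len ws - 1 - 0).toNat = ws.length - 1 := by
    simp [PySem.List.len_eq]
  rw [hm, List.foldl_map, ← pairs_eq ws, List.foldl_map]
  congr 1
  funext d k
  have h0 : (0 : Int) + (k : Int) = ((k : Nat) : Int) := by omega
  have h1 : (0 : Int) + (k : Int) + 1 = (((k + 1 : Nat)) : Int) := by push_cast; omega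
  rw [h0]
  rw [show ((k:Int) + 1) = (((k + 1 : Nat)) : Int) from by push_cast; omega,
    PySem.List.pyGetD_natCast, PySem.List.pyGetD_natCast]

theorem perkeyA (d : PySem.Dict String (List String)) (n : Nat) (h1 : 1 ≤ n) (key : String) :
    dfsA (n + 1) [] [] d key 0 (n : Int)
      = (tails d (n - 1) key).map (fun t => PySem.Str.join " " (key :: t)) := by
  rw [dfsA_eq d (n : Int) (n - 1) (n + 1) [] [] key 0 (by omega) (by simp; omega)]
  simp

theorem main_eq (ws : List String) :
    (((PySem.List.pyRange 0 (PySem.List.len ws - 1) 1).foldl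
        (fun d i => d.modify (PySem.List.pyGetD ws i "") []
          (fun v => v ++ [PySem.List.pyGetD ws (i + 1) ""])) PySem.Dict.empty).keys.foldl
      (fun all key => all ++ [dfsA (ws.length + 1) [] []
        ((PySem.List.pyRange 0 (PySem.List.len ws - 1) 1).foldl
          (fun d i => d.modify (PySem.List.pyGetD ws i "") []
            (fun v => v ++ [PySem.List.pyGetD ws (i + 1) ""])) PySem.Dict.empty)
        key 0 (PySem.List.len ws)]) []).foldl (fun acc x => acc ++ x) []
    = ((ws.zip ws.tail).foldl
        (fun d p => d.modify p.1 [] (fun v => v ++ [p.2])) PySem.Dict.empty).keys.foldl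
      (fun out start =>
        out ++ ((List.range (ws.length - 1)).foldl
          (fun ps _ => ps.flatMap (fun p =>
            (((ws.zip ws.tail).foldl
              (fun d p => d.modify p.1 [] (fun v => v ++ [p.2])) PySem.Dict.empty).getD
                (PySem.List.pyGetD p (-1) "") []).map (fun nb => p ++ [nb])))
          [[start]]).map (fun p => PySem.Str.join " " p)) [] := by
  rw [dictA_eq ws]
  generalize hd : (ws.zip ws.tail).foldl
      (fun d p => d.modify p.1 [] (fun v => v ++ [p.2])) PySem.Dict.empty = d
  rw [PySem.List.foldl_append_singleton_eq_map, PySem.List.foldl_append_eq_flatten,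
    PySem.List.foldl_append_eq_flatMap]
  simp only [List.nil_append, ← List.flatMap_def]
  by_cases hn : ws.length = 0
  · have : ws = [] := List.length_eq_zero_iff.mp hn
    subst this
    simp at hd
    rw [← hd, PySem.Dict.keys_empty]
    rfl
  · have h1 : 1 ≤ ws.length := Nat.one_le_iff_ne_zero.mpr hn
    have hFG : ∀ key,
        dfsA (ws.length + 1) [] [] d key 0 (PySem.List.len ws)
          = ((List.range (ws.length - 1)).foldl
              (fun ps _ => ps.flatMap (fun p =>
                (d.getD (PySem.List.pyGetD p (-1) "") []).map (fun nb => p ++ [nb])))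
              [[key]]).map (fun p => PySem.Str.join " " p) := by
      intro key
      rw [PySem.List.len_eq, perkeyA d ws.length h1 key, iterB]
      simp [List.map_map, Function.comp_def]
    simp only [hFG]

-- ===== VERDICT (by name: the statement is the Claim_ definition above) =====
theorem mutate_sentences_spec : Claim_equal_mutate_sentences := by
  intro sentence _
  show mutate_sentences sentence = mutate_sentences_alt sentence
  exact main_eq (PySem.Str.split₀ sentence)
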